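-- pv_equiv track=rewrite | github.com/songorithm/algorithm-problem-solving | QUADTREE/jonnung_quadtree.py | reverse_quadtree
-- ===== SOURCE A (Python) =====
-- def reverse_quadtree(str_list):
--     head = str_list.pop(0)
--
--     if head != 'x':
--         return head
--
--     quad_list = [reverse_quadtree(str_list) for i in range(4)]
--
--     quad_list[0], quad_list[2] = quad_list[2], quad_list[0]
--     quad_list[1], quad_list[3] = quad_list[3], quad_list[1]
--
--     return 'x' + str.join('', quad_list)
-- ===== SOURCE B (Python) =====
-- def reverse_quadtree(str_list):
--     head = str_list.pop(0)
--     if head != 'x':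
--         return head
--     stack = [[]]
--     while True:
--         tok = str_list.pop(0)
--         if tok == 'x':
--             stack.append([])
--             continue
--         node = tok
--         while True:
--             stack[-1].append(node)
--             if len(stack[-1]) < 4:
--                 break
--             c = stack.pop()
--             node = 'x' + c[2] + c[3] + c[0] + c[1]
--             if not stack:
--                 return node
-- ===== Notes on version B (the rewrite author's own statement) =====
-- stated objective: alternative
-- what changed: Replaces A's recursive-descent parse (a recursive call per node, returning each node's string) with an explicit stack of partial nodes: one loop pops tokens, pushes child lists for 'x', and cascades completions, emitting children in 2,3,0,1 order; cost is the same O(n).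
import Mathlib
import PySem

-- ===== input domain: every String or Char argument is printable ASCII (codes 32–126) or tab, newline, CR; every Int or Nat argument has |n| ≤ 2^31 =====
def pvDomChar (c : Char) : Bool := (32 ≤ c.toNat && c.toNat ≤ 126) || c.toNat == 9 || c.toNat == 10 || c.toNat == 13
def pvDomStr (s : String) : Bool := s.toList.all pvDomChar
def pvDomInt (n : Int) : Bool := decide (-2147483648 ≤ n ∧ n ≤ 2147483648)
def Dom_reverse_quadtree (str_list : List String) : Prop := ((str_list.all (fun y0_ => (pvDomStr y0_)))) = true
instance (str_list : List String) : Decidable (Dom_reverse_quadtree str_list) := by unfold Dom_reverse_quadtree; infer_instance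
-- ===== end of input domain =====

-- B replaces A's recursion by an explicit stack of partial nodes (same cost); both
-- versions pop consumed tokens off str_list in place (caller-visible mutation is identical).

-- ===== PORT A =====
-- fuel-indexed transliteration of A's recursion; fuel = remaining list length always suffices,
-- and `none` marks exactly the inputs where the Python raises IndexError (excluded by Pre_).
def revA_aux : Nat → List String → Option (String × List String)
  | _, [] => none                   -- str_list.pop(0) raises IndexError
  | 0, _ :: _ => none               -- fuel exhaustion (unreachable for fuel ≥ length)
  | f+1, head :: t =>
    if head ≠ "x" then some (head, t)
    else
      match revA_aux f t with
      | none => none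
      | some (q0, r0) =>
        match revA_aux f r0 with
        | none => none
        | some (q1, r1) =>
          match revA_aux f r1 with
          | none => none
          | some (q2, r2) =>
            match revA_aux f r2 with
            | none => none
            | some (q3, r3) => some ("x" ++ q2 ++ q3 ++ q0 ++ q1, r3)

def reverse_quadtree (str_list : List String) : String :=
  match revA_aux str_list.length str_list with
  | some (v, _) => v
  | none => ""                      -- Python raises here (outside Pre_)

-- ===== PORT B =====
-- inner `while True` of Source B: append node to stack top, cascade completions; Sum.inr = `return node`
def pushNode : String → List (List String) → Option (Sum (List (List String)) String)
  | _, [] => none                   -- stack[-1] on empty stack (unreachable)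
  | node, top :: rest =>
    if (top ++ [node]).length < 4 then some (Sum.inl ((top ++ [node]) :: rest))
    else
      match top ++ [node] with
      | [c0, c1, c2, c3] =>
        match rest with
        | [] => some (Sum.inr ("x" ++ c2 ++ c3 ++ c0 ++ c1))
        | _ :: _ => pushNode ("x" ++ c2 ++ c3 ++ c0 ++ c1) rest
      | _ => none                   -- unreachable: top always has < 4 entries

-- outer `while True` of Source B, fuel-indexed by remaining tokens
def revB_loop : Nat → List String → List (List String) → Option (String × List String)
  | _, [], _ => none                -- str_list.pop(0) raises IndexError
  | 0, _ :: _, _ => none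
  | f+1, tok :: rest, stack =>
    if tok = "x" then revB_loop f rest ([] :: stack)
    else
      match pushNode tok stack with
      | some (Sum.inr v) => some (v, rest)
      | some (Sum.inl stack') => revB_loop f rest stack'
      | none => none

def reverse_quadtree_alt (str_list : List String) : String :=
  match str_list with
  | [] => ""                        -- Python raises here (outside Pre_)
  | head :: rest =>
    if head ≠ "x" then head
    else
      match revB_loop rest.length rest [[]] with
      | some (v, _) => v
      | none => ""                  -- Python raises here (outside Pre_)

-- ===== PRECONDITION & SPEC =====
-- token weight: an 'x' opens 4 children (net +3 open slots), a leaf closes one slot (-1)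
def pvDelta (p : List String) : Int := (p.map fun t => if t = "x" then (3:Int) else -1).sum

-- Pre_ = exactly the inputs where Python A returns (a complete quadtree serialization is a
-- prefix of the list): starting from 1 open slot, some prefix closes all slots.
def Pre_reverse_quadtree (str_list : List String) : Prop :=
  ∃ k, k ≤ str_list.length ∧ (1:Int) + pvDelta (str_list.take k) = 0
instance (str_list : List String) : Decidable (Pre_reverse_quadtree str_list) := by
  unfold Pre_reverse_quadtree; infer_instance

def pvWitness_reverse_quadtree : List String := ["x", "a", "b", "c", "d"]

def Spec_reverse_quadtree (str_list : List String) (out : String) : Prop := out = reverse_quadtree_alt str_list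
instance (str_list : List String) (out : String) : Decidable (Spec_reverse_quadtree str_list out) := by unfold Spec_reverse_quadtree; infer_instance

-- ===== CLAIM (what is proved, stated in full; the proofs are below) =====
def Claim_equal_reverse_quadtree : Prop := ∀ (str_list : List String), Dom_reverse_quadtree str_list → Pre_reverse_quadtree str_list → Spec_reverse_quadtree str_list (reverse_quadtree str_list)

-- ===== LEMMAS AND PROOFS =====

-- consuming a parse shortens the list
lemma revA_consume : ∀ (f : Nat) (l : List String) (v : String) (r : List String),
    revA_aux f l = some (v, r) → r.length < l.length := by
  intro f
  induction f with
  | zero => intro l v r h; cases l <;> simp [revA_aux] at h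
  | succ f ih =>
    intro l v r h
    cases l with
    | nil => simp [revA_aux] at h
    | cons hd t =>
      by_cases hx : hd = "x"
      · simp only [revA_aux, hx, ne_eq, not_true_eq_false, if_false] at h
        rcases e0 : revA_aux f t with _ | ⟨q0, r0⟩ <;> rw [e0] at h <;> try simp at h
        rcases e1 : revA_aux f r0 with _ | ⟨q1, r1⟩ <;> rw [e1] at h <;> try simp at h
        rcases e2 : revA_aux f r1 with _ | ⟨q2, r2⟩ <;> rw [e2] at h <;> try simp at h
        rcases e3 : revA_aux f r2 with _ | ⟨q3, r3⟩ <;> rw [e3] at h <;> try simp at h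
        have h0 := ih t q0 r0 e0
        have h1 := ih r0 q1 r1 e1
        have h2 := ih r1 q2 r2 e2
        have h3 := ih r2 q3 r3 e3
        simp [← h.2]
        omega
      · simp [revA_aux, hx] at h
        simp [← h.2]

-- revA_aux does not depend on the fuel once the fuel covers the list length
lemma revA_fuel : ∀ (n : Nat) (l : List String) (f f' : Nat),
    l.length ≤ n → l.length ≤ f → l.length ≤ f' → revA_aux f l = revA_aux f' l := by
  intro n
  induction n with
  | zero =>
    intro l f f' hn _ _
    have : l = [] := List.length_eq_zero_iff.mp (Nat.le_zero.mp hn)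
    subst this; cases f <;> cases f' <;> simp [revA_aux]
  | succ n ih =>
    intro l f f' hn hf hf'
    cases l with
    | nil => cases f <;> cases f' <;> simp [revA_aux]
    | cons hd t =>
      simp only [List.length_cons] at hn hf hf'
      obtain ⟨a, rfl⟩ : ∃ a, f = a + 1 := ⟨f - 1, by omega⟩
      obtain ⟨b, rfl⟩ : ∃ b, f' = b + 1 := ⟨f' - 1, by omega⟩
      by_cases hx : hd = "x"
      · simp only [revA_aux, hx, ne_eq, not_true_eq_false, if_false]
        have e0 : revA_aux a t = revA_aux b t := ih t a b (by omega) (by omega) (by omega)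
        rw [e0]
        rcases h0 : revA_aux b t with _ | ⟨q0, r0⟩
        · rfl
        · have l0 := revA_consume b t q0 r0 h0
          have e1 : revA_aux a r0 = revA_aux b r0 := ih r0 a b (by omega) (by omega) (by omega)
          dsimp only
          rw [e1]
          rcases h1 : revA_aux b r0 with _ | ⟨q1, r1⟩
          · rfl
          · have l1 := revA_consume b r0 q1 r1 h1
            have e2 : revA_aux a r1 = revA_aux b r1 := ih r1 a b (by omega) (by omega) (by omega)
            dsimp only
            rw [e2]
            rcases h2 : revA_aux b r1 with _ | ⟨q2, r2⟩
            · rfl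
            · have l2 := revA_consume b r1 q2 r2 h2
              have e3 : revA_aux a r2 = revA_aux b r2 := ih r2 a b (by omega) (by omega) (by omega)
              dsimp only
              rw [e3]
      · simp [revA_aux, hx]

-- canonical ("fuel = length") parse predicate
def PParse (l : List String) (v : String) (r : List String) : Prop :=
  revA_aux l.length l = some (v, r)

lemma PParse_leaf (hd : String) (t : List String) (hx : hd ≠ "x") : PParse (hd :: t) hd t := by
  simp [PParse, revA_aux, hx]

lemma PParse_x {t r0 r1 r2 r3 : List String} {q0 q1 q2 q3 : String}
    (h0 : PParse t q0 r0) (h1 : PParse r0 q1 r1) (h2 : PParse r1 q2 r2) (h3 : PParse r2 q3 r3) :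
    PParse ("x" :: t) ("x" ++ q2 ++ q3 ++ q0 ++ q1) r3 := by
  unfold PParse at *
  have l0 := revA_consume _ _ _ _ h0
  have l1 := revA_consume _ _ _ _ h1
  have l2 := revA_consume _ _ _ _ h2
  have e0 : revA_aux t.length t = some (q0, r0) := h0
  have e1 : revA_aux t.length r0 = some (q1, r1) := by
    rw [revA_fuel t.length r0 t.length r0.length (by omega) (by omega) (by omega)]; exact h1
  have e2 : revA_aux t.length r1 = some (q2, r2) := by
    rw [revA_fuel t.length r1 t.length r1.length (by omega) (by omega) (by omega)]; exact h2
  have e3 : revA_aux t.length r2 = some (q3, r3) := by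
    rw [revA_fuel t.length r2 t.length r2.length (by omega) (by omega) (by omega)]; exact h3
  simp [List.length_cons, revA_aux, e0, e1, e2, e3]

-- parse c consecutive subtrees
def PMany : Nat → List String → List String → Prop
  | 0, l, r => r = l
  | c+1, l, r => ∃ v m, PParse l v m ∧ PMany c m r

-- completeness: if c open slots can be closed by some prefix, c subtrees parse
lemma pmany_of_delta : ∀ (n : Nat) (l : List String) (c : Nat),
    l.length ≤ n → (∃ k, k ≤ l.length ∧ (c : Int) + pvDelta (l.take k) = 0) →
    ∃ r, PMany c l r := by
  intro n
  induction n with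
  | zero =>
    intro l c hn hk
    have hl : l = [] := List.length_eq_zero_iff.mp (Nat.le_zero.mp hn)
    subst hl
    obtain ⟨k, hk1, hk2⟩ := hk
    obtain rfl : k = 0 := by simpa using hk1
    simp [pvDelta] at hk2
    obtain rfl : c = 0 := by exact_mod_cast hk2
    exact ⟨[], rfl⟩
  | succ n ih =>
    intro l c hn hk
    cases c with
    | zero => exact ⟨l, rfl⟩
    | succ c =>
      obtain ⟨k, hk1, hk2⟩ := hk
      cases k with
      | zero => simp [pvDelta] at hk2; omega
      | succ k =>
        cases l with
        | nil => simp at hk1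
        | cons hd t =>
          simp only [List.length_cons] at hn hk1
          rw [List.take_succ_cons] at hk2
          by_cases hx : hd = "x"
          · subst hx
            simp only [pvDelta, List.map_cons, List.sum_cons] at hk2
            have hk2' : ((c + 4 : Nat) : Int) + pvDelta (t.take k) = 0 := by
              push_cast; push_cast at hk2; unfold pvDelta; omega
            obtain ⟨r, hr⟩ := ih t (c + 4) (by omega) ⟨k, by omega, hk2'⟩
            obtain ⟨v0, m0, p0, hr⟩ := hr
            obtain ⟨v1, m1, p1, hr⟩ := hr
            obtain ⟨v2, m2, p2, hr⟩ := hr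
            obtain ⟨v3, m3, p3, hr⟩ := hr
            exact ⟨r, _, m3, PParse_x p0 p1 p2 p3, hr⟩
          · simp only [pvDelta, List.map_cons, List.sum_cons, if_neg hx] at hk2
            have hk2' : ((c : Nat) : Int) + pvDelta (t.take k) = 0 := by
              push_cast at hk2; unfold pvDelta; omega
            obtain ⟨r, hr⟩ := ih t c (by omega) ⟨k, by omega, hk2'⟩
            exact ⟨r, hd, t, PParse_leaf hd t hx, hr⟩

-- B's stack machine simulates A's recursion: after parsing one subtree, the produced node
-- is pushed onto the (nonempty) stack and the loop continues on the rest with reduced fuel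
lemma simB : ∀ (f : Nat) (l : List String) (node : String) (rest : List String),
    revA_aux f l = some (node, rest) →
    ∀ (S : List (List String)) (g : Nat), S ≠ [] →
    revB_loop (g + l.length) l S =
      (match pushNode node S with
       | some (Sum.inr v) => some (v, rest)
       | some (Sum.inl S') => revB_loop (g + rest.length) rest S'
       | none => none) := by
  intro f
  induction f with
  | zero => intro l node rest h; cases l <;> simp [revA_aux] at h
  | succ f ih =>
    intro l node rest h S g hS
    cases l with
    | nil => simp [revA_aux] at h
    | cons hd t =>
      by_cases hx : hd = "x"
      · subst hx
        simp only [revA_aux, ne_eq, not_true_eq_false, if_false] at h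
        rcases e0 : revA_aux f t with _ | ⟨q0, r0⟩ <;> rw [e0] at h <;> try simp at h
        rcases e1 : revA_aux f r0 with _ | ⟨q1, r1⟩ <;> rw [e1] at h <;> try simp at h
        rcases e2 : revA_aux f r1 with _ | ⟨q2, r2⟩ <;> rw [e2] at h <;> try simp at h
        rcases e3 : revA_aux f r2 with _ | ⟨q3, r3⟩ <;> rw [e3] at h <;> try simp at h
        obtain ⟨hnode, hrest⟩ := h
        subst hnode; subst hrest
        have step : revB_loop (g + (("x" :: t).length)) ("x" :: t) S
            = revB_loop (g + t.length) t ([] :: S) := by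
          simp [List.length_cons, revB_loop]
        rw [step, ih t q0 r0 e0 ([] :: S) g (by simp)]
        simp only [pushNode, List.nil_append, List.length_cons, List.length_nil]
        norm_num
        rw [ih r0 q1 r1 e1 ([q0] :: S) g (by simp)]
        simp only [pushNode, List.cons_append, List.nil_append, List.length_cons, List.length_nil]
        norm_num
        rw [ih r1 q2 r2 e2 ([q0, q1] :: S) g (by simp)]
        simp only [pushNode, List.cons_append, List.nil_append, List.length_cons, List.length_nil]
        norm_num
        rw [ih r2 q3 r3 e3 ([q0, q1, q2] :: S) g (by simp)]
        simp only [pushNode, List.cons_append, List.nil_append, List.length_cons, List.length_nil]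
        norm_num
        cases S with
        | nil => exact absurd rfl hS
        | cons s S' => rfl
      · simp only [revA_aux, ne_eq, hx, not_false_eq_true, if_true, Option.some.injEq,
          Prod.mk.injEq] at h
        obtain ⟨rfl, rfl⟩ := h
        simp [List.length_cons, revB_loop, hx]

-- ===== VERDICT (by name: the statement is the Claim_ definition above) =====
theorem reverse_quadtree_spec : Claim_equal_reverse_quadtree := by
  intro l _ hpre
  unfold Spec_reverse_quadtree
  obtain ⟨r, hr⟩ := pmany_of_delta l.length l 1 le_rfl (by
    obtain ⟨k, h1, h2⟩ := hpre; exact ⟨k, h1, by exact_mod_cast h2⟩)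
  obtain ⟨v, m, hp, hm⟩ := hr
  unfold PParse at hp
  unfold reverse_quadtree reverse_quadtree_alt
  rw [hp]
  cases l with
  | nil => simp [revA_aux] at hp
  | cons hd t =>
    by_cases hx : hd = "x"
    · subst hx
      simp only [List.length_cons, revA_aux, ne_eq, not_true_eq_false, if_false] at hp
      rcases e0 : revA_aux t.length t with _ | ⟨q0, r0⟩ <;> rw [e0] at hp <;> try simp at hp
      rcases e1 : revA_aux t.length r0 with _ | ⟨q1, r1⟩ <;> rw [e1] at hp <;> try simp at hp
      rcases e2 : revA_aux t.length r1 with _ | ⟨q2, r2⟩ <;> rw [e2] at hp <;> try simp at hp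
      rcases e3 : revA_aux t.length r2 with _ | ⟨q3, r3⟩ <;> rw [e3] at hp <;> try simp at hp
      obtain ⟨hv, hm'⟩ := hp
      simp only [ne_eq, not_true_eq_false, if_false]
      have z0 : revB_loop t.length t [[]] = revB_loop (0 + t.length) t [[]] := by rw [Nat.zero_add]
      rw [z0, simB t.length t q0 r0 e0 [[]] 0 (by simp)]
      simp only [pushNode, List.nil_append, List.length_cons, List.length_nil]
      norm_num
      rw [← Nat.zero_add r0.length, simB t.length r0 q1 r1 e1 [[q0]] 0 (by simp)]
      simp only [pushNode, List.cons_append, List.nil_append, List.length_cons, List.length_nil]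
      norm_num
      rw [← Nat.zero_add r1.length, simB t.length r1 q2 r2 e2 [[q0, q1]] 0 (by simp)]
      simp only [pushNode, List.cons_append, List.nil_append, List.length_cons, List.length_nil]
      norm_num
      rw [← Nat.zero_add r2.length, simB t.length r2 q3 r3 e3 [[q0, q1, q2]] 0 (by simp)]
      simp only [pushNode, List.cons_append, List.nil_append, List.length_cons, List.length_nil]
      norm_num
      exact hv.symm
    · simp [List.length_cons, revA_aux, hx] at hp
      simp [hx, ← hp.1]
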